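-- pv_equiv track=rewrite | github.com/jeff-donovan/aoc-2024 | day_21/21.2.py | directional_to_directional
-- ===== SOURCE A (Python) =====
-- DIRECTIONAL_KEYPAD = {
--     'A': {
--         '<': '^',
--         'v': '>'
--     },
--     '^': {
--         '>': 'A',
--         'v': 'v',
--     },
--     '<': {
--         '>': 'v',
--     },
--     '>': {
--         '<': 'v',
--         '^': 'A'
--     },
--     'v': {
--         '<': '<',
--         '>': '>',
--         '^': '^',
--     },
-- }
--
-- def find_shortest_paths(keypad, start_char, end_char, visited=None):
--     if visited is None:
--         visited = []
--
--     if start_char in visited: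
--         return []
--
--     if start_char == end_char:
--         return [['A']]
--
--     paths = []
--     for direction, next_start_char in keypad[start_char].items():
--         next_paths = [[direction] + path for path in find_shortest_paths(keypad, next_start_char, end_char, visited + [start_char])]
--         paths += next_paths
--
--     return [path for path in paths if len(path) == calculate_min_path_length(paths)]
--
-- def calculate_min_path_length(paths):
--     if len(paths) == 0:
--         return 0
--     return min([len(path) for path in paths])
--
-- def directional_to_directional(directional_seq):
--     sequences = [[]]
--     for i in range(len(directional_seq)):
--         if i == 0:
--             start = 'A'
--         else:
--             start = directional_seq[i - 1]
--         end = directional_seq[i]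
--         paths = find_shortest_paths(DIRECTIONAL_KEYPAD, start, end)
--         new_sequences = []
--         for path in paths:
--             for seq in sequences:
--                 new_sequences.append(seq + path)
--         sequences = new_sequences
--     return sequences
-- ===== SOURCE B (Python) =====
-- # B: the keypad is a fixed 5-key constant, so the shortest-path sets between
-- # keys are precomputed once as a lookup table; no recursive search at runtime.
--
-- _SHORTEST = {
--     ('A', '^'): [['<', 'A']],
--     ('A', '<'): [['<', 'v', '<', 'A'], ['v', '<', '<', 'A']],
--     ('A', '>'): [['v', 'A']],
--     ('A', 'v'): [['<', 'v', 'A'], ['v', '<', 'A']],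
--     ('^', 'A'): [['>', 'A']],
--     ('^', '<'): [['v', '<', 'A']],
--     ('^', '>'): [['>', 'v', 'A'], ['v', '>', 'A']],
--     ('^', 'v'): [['v', 'A']],
--     ('<', 'A'): [['>', '>', '^', 'A'], ['>', '^', '>', 'A']],
--     ('<', '^'): [['>', '^', 'A']],
--     ('<', '>'): [['>', '>', 'A']],
--     ('<', 'v'): [['>', 'A']],
--     ('>', 'A'): [['^', 'A']],
--     ('>', '^'): [['<', '^', 'A'], ['^', '<', 'A']],
--     ('>', '<'): [['<', '<', 'A']],
--     ('>', 'v'): [['<', 'A']],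
--     ('v', 'A'): [['>', '^', 'A'], ['^', '>', 'A']],
--     ('v', '^'): [['^', 'A']],
--     ('v', '<'): [['<', 'A']],
--     ('v', '>'): [['>', 'A']],
-- }
--
-- def directional_to_directional(directional_seq):
--     sequences = [[]]
--     prev = 'A'
--     for key in directional_seq:
--         if prev == key:
--             paths = [['A']]
--         else:
--             paths = _SHORTEST.get((prev, key), [])
--         sequences = [seq + path for path in paths for seq in sequences]
--         prev = key
--     return sequences
-- ===== Notes on version B (the rewrite author's own statement) =====
-- stated objective: simpler
-- what changed: The per-transition recursive DFS over the keypad with a min-length filter (find_shortest_paths) is replaced by a single precomputed lookup table of the fixed 5-key keypad's shortest paths, so each transition is one dict lookup instead of a recursive path search.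
import Mathlib
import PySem

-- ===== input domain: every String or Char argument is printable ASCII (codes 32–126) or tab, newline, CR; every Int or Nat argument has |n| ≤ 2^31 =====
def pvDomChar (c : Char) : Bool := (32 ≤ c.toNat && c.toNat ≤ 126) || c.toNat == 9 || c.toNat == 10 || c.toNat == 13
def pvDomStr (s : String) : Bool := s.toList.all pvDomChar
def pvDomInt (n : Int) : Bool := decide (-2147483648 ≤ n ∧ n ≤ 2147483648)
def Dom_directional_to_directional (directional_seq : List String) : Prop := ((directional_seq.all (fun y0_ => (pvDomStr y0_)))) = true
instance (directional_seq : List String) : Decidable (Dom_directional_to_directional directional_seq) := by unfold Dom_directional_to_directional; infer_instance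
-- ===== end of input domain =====

-- B replaces A's per-transition recursive DFS + min-filter by a lookup in a
-- precomputed table of the fixed 5-key keypad's shortest paths (objective: simpler).

-- ===== PORT A =====
def pvKeypad : PySem.Dict String (PySem.Dict String String) :=
  PySem.Dict.mk [("A", PySem.Dict.mk [("<", "^"), ("v", ">")]),
                 ("^", PySem.Dict.mk [(">", "A"), ("v", "v")]),
                 ("<", PySem.Dict.mk [(">", "v")]),
                 (">", PySem.Dict.mk [("<", "v"), ("^", "A")]),
                 ("v", PySem.Dict.mk [("<", "<"), (">", ">"), ("^", "^")])]

def pvCalcMin (paths : List (List String)) : Int :=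
  if paths.length = 0 then 0
  else (PySem.List.min? (paths.map (fun p => (p.length : Int))) (fun x => x)).getD 0

-- fuel only makes the recursion total; 6 is enough since visited gains a fresh
-- keypad key at every level and the keypad has 5 keys.
def pvFsp (fuel : Nat) (startChar endChar : String) (visited : List String) : List (List String) :=
  match fuel with
  | 0 => []
  | fuel + 1 =>
    if visited.contains startChar then []
    else if startChar = endChar then [["A"]]
    else
      match PySem.Dict.get? pvKeypad startChar with
      | none => []  -- Python raises KeyError here; Pre_ keeps this unreachable
      | some m =>
        let paths := m.items.foldl (fun paths dn =>
          paths ++ (pvFsp fuel dn.2 endChar (visited ++ [startChar])).map (fun p => dn.1 :: p)) []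
        paths.filter (fun p => (p.length : Int) = pvCalcMin paths)

def directional_to_directional (directional_seq : List String) : List (List String) :=
  (PySem.List.pyRange 0 directional_seq.length 1).foldl (fun sequences i =>
    let s := if i = 0 then "A" else PySem.List.pyGetD directional_seq (i - 1) ""
    let e := PySem.List.pyGetD directional_seq i ""
    let paths := pvFsp 6 s e []
    paths.foldl (fun ns path => sequences.foldl (fun ns2 sq => ns2 ++ [sq ++ path]) ns) []) [[]]

-- ===== PORT B =====
def pvShortest : PySem.Dict (String × String) (List (List String)) :=
  PySem.Dict.mk
    [(("A", "^"), [["<", "A"]]),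
     (("A", "<"), [["<", "v", "<", "A"], ["v", "<", "<", "A"]]),
     (("A", ">"), [["v", "A"]]),
     (("A", "v"), [["<", "v", "A"], ["v", "<", "A"]]),
     (("^", "A"), [[">", "A"]]),
     (("^", "<"), [["v", "<", "A"]]),
     (("^", ">"), [[">", "v", "A"], ["v", ">", "A"]]),
     (("^", "v"), [["v", "A"]]),
     (("<", "A"), [[">", ">", "^", "A"], [">", "^", ">", "A"]]),
     (("<", "^"), [[">", "^", "A"]]),
     (("<", ">"), [[">", ">", "A"]]),
     (("<", "v"), [[">", "A"]]),
     ((">", "A"), [["^", "A"]]),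
     ((">", "^"), [["<", "^", "A"], ["^", "<", "A"]]),
     ((">", "<"), [["<", "<", "A"]]),
     ((">", "v"), [["<", "A"]]),
     (("v", "A"), [[">", "^", "A"], ["^", ">", "A"]]),
     (("v", "^"), [["^", "A"]]),
     (("v", "<"), [["<", "A"]]),
     (("v", ">"), [[">", "A"]])]

def pvPathsB (prev key : String) : List (List String) :=
  if prev = key then [["A"]]
  else (PySem.Dict.get? pvShortest (prev, key)).getD []

def directional_to_directional_alt (directional_seq : List String) : List (List String) :=
  (directional_seq.foldl
    (fun (st : List (List String) × String) key =>
      ((pvPathsB st.2 key).flatMap (fun p => st.1.map (fun s => s ++ p)), key))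
    ([[]], "A")).1

-- ===== PRECONDITION & SPEC =====
-- Pre_ excludes exactly the inputs on which A raises KeyError: some element that is
-- neither a keypad key nor equal to its successor is used as the next start key.
def Pre_directional_to_directional (directional_seq : List String) : Prop :=
  List.IsChain (fun a b => a = "A" ∨ a = "^" ∨ a = "<" ∨ a = ">" ∨ a = "v" ∨ a = b) directional_seq
instance (directional_seq : List String) : Decidable (Pre_directional_to_directional directional_seq) := by unfold Pre_directional_to_directional; infer_instance
def pvWitness_directional_to_directional : List String := ["<", "<", "A"]
def Spec_directional_to_directional (directional_seq : List String) (out : List (List String)) : Prop := out = directional_to_directional_alt directional_seq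
instance (directional_seq : List String) (out : List (List String)) : Decidable (Spec_directional_to_directional directional_seq out) := by unfold Spec_directional_to_directional; infer_instance

-- ===== CLAIM (what is proved, stated in full; the proofs are below) =====
def Claim_equal_directional_to_directional : Prop := ∀ (directional_seq : List String), Dom_directional_to_directional directional_seq → Pre_directional_to_directional directional_seq → Spec_directional_to_directional directional_seq (directional_to_directional directional_seq)

-- ===== LEMMAS AND PROOFS =====

-- A's DFS finds nothing when the target is not a keypad key (and differs from start).
theorem pvFsp_no_end (e : String) (h1 : e ≠ "A") (h2 : e ≠ "^") (h3 : e ≠ "<")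
    (h4 : e ≠ ">") (h5 : e ≠ "v") :
    ∀ (fuel : Nat) (s : String) (visited : List String), s ≠ e → pvFsp fuel s e visited = [] := by
  intro fuel
  induction fuel with
  | zero => intro s visited _; rfl
  | succ n ih =>
    intro s visited hne
    have iA : ∀ v, pvFsp n "A" e v = [] := fun v => ih "A" v (Ne.symm h1)
    have iU : ∀ v, pvFsp n "^" e v = [] := fun v => ih "^" v (Ne.symm h2)
    have iL : ∀ v, pvFsp n "<" e v = [] := fun v => ih "<" v (Ne.symm h3)
    have iR : ∀ v, pvFsp n ">" e v = [] := fun v => ih ">" v (Ne.symm h4)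
    have iD : ∀ v, pvFsp n "v" e v = [] := fun v => ih "v" v (Ne.symm h5)
    rw [pvFsp]
    by_cases hv : visited.contains s = true
    · rw [if_pos hv]
    · rw [if_neg hv, if_neg hne]
      by_cases sA : s = "A"
      · subst sA; simp [pvKeypad, PySem.Dict.get?_mk_cons, iU, iR]
      by_cases sU : s = "^"
      · subst sU; simp [pvKeypad, PySem.Dict.get?_mk_cons, iA, iD]
      by_cases sL : s = "<"
      · subst sL; simp [pvKeypad, PySem.Dict.get?_mk_cons, iD]
      by_cases sR : s = ">"
      · subst sR; simp [pvKeypad, PySem.Dict.get?_mk_cons, iA, iD]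
      by_cases sD : s = "v"
      · subst sD; simp [pvKeypad, PySem.Dict.get?_mk_cons, iU, iL, iR]
      · simp [pvKeypad, PySem.Dict.get?, Ne.symm sA, Ne.symm sU,
              Ne.symm sL, Ne.symm sR, Ne.symm sD]

-- B's table lookup misses when the target is not a keypad key.
theorem pvPathsB_no_end (s e : String) (h1 : e ≠ "A") (h2 : e ≠ "^") (h3 : e ≠ "<")
    (h4 : e ≠ ">") (h5 : e ≠ "v") (hne : s ≠ e) : pvPathsB s e = [] := by
  unfold pvPathsB
  rw [if_neg hne]
  simp [pvShortest, PySem.Dict.get?, Ne.symm h1, Ne.symm h2,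
        Ne.symm h3, Ne.symm h4, Ne.symm h5]

-- per-transition agreement
theorem pvStep_eq (s e : String)
    (h : (s = "A" ∨ s = "^" ∨ s = "<" ∨ s = ">" ∨ s = "v") ∨ s = e) :
    pvFsp 6 s e [] = pvPathsB s e := by
  by_cases hse : s = e
  · subst hse
    rw [pvFsp, pvPathsB]
    simp
  · have hkey : s = "A" ∨ s = "^" ∨ s = "<" ∨ s = ">" ∨ s = "v" := by tauto
    by_cases e1 : e = "A"
    · subst e1; rcases hkey with rfl | rfl | rfl | rfl | rfl <;> rfl
    by_cases e2 : e = "^"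
    · subst e2; rcases hkey with rfl | rfl | rfl | rfl | rfl <;> rfl
    by_cases e3 : e = "<"
    · subst e3; rcases hkey with rfl | rfl | rfl | rfl | rfl <;> rfl
    by_cases e4 : e = ">"
    · subst e4; rcases hkey with rfl | rfl | rfl | rfl | rfl <;> rfl
    by_cases e5 : e = "v"
    · subst e5; rcases hkey with rfl | rfl | rfl | rfl | rfl <;> rfl
    · rw [pvFsp_no_end e e1 e2 e3 e4 e5 6 s [] hse, pvPathsB_no_end s e e1 e2 e3 e4 e5 hse]

-- A's nested accumulation loop is the flatMap B uses.
theorem pvCombine_eq (paths sequences : List (List String)) :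
    paths.foldl (fun ns path => sequences.foldl (fun ns2 sq => ns2 ++ [sq ++ path]) ns) []
      = paths.flatMap (fun p => sequences.map (fun s => s ++ p)) := by
  suffices h : ∀ acc : List (List String),
      paths.foldl (fun ns path => sequences.foldl (fun ns2 sq => ns2 ++ [sq ++ path]) ns) acc
        = acc ++ paths.flatMap (fun p => sequences.map (fun s => s ++ p)) by
    simpa using h []
  intro acc
  induction paths generalizing acc with
  | nil => simp
  | cons p rest ih =>
    simp only [List.foldl_cons, List.flatMap_cons]
    rw [PySem.List.foldl_append_singleton_eq_map, ih]
    simp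

theorem pvAlt_snd (seq : List String) (st : List (List String)) (p : String) :
    (seq.foldl (fun (st : List (List String) × String) key =>
      ((pvPathsB st.2 key).flatMap (fun p => st.1.map (fun s => s ++ p)), key)) (st, p)).2
      = seq.getLastD p := by
  induction seq generalizing st p with
  | nil => simp
  | cons a t ih =>
    simp only [List.foldl_cons, ih]
    cases t with
    | nil => simp
    | cons b t' =>
      cases h : (b :: t').getLast? with
      | none => simp at h
      | some c => simp [h]

theorem pvAlt_append (seq : List String) (x : String) :
    directional_to_directional_alt (seq ++ [x])
      = (pvPathsB (seq.getLastD "A") x).flatMap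
          (fun p => (directional_to_directional_alt seq).map (fun s => s ++ p)) := by
  unfold directional_to_directional_alt
  rw [List.foldl_append]
  simp only [List.foldl_cons, List.foldl_nil]
  rw [pvAlt_snd]

theorem pvA_append (seq : List String) (x : String) :
    directional_to_directional (seq ++ [x])
      = (pvFsp 6 (seq.getLastD "A") x []).foldl
          (fun ns path => (directional_to_directional seq).foldl
            (fun ns2 sq => ns2 ++ [sq ++ path]) ns) [] := by
  unfold directional_to_directional
  have hlen : ((seq ++ [x]).length : Int) = (seq.length : Int) + 1 := by simp
  rw [hlen, PySem.List.pyRange_one_succ_right (by positivity), List.foldl_append]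
  have hinner :
      List.foldl (fun (sequences : List (List String)) (i : Int) =>
        let s := if i = 0 then "A" else PySem.List.pyGetD (seq ++ [x]) (i - 1) ""
        let e := PySem.List.pyGetD (seq ++ [x]) i ""
        let paths := pvFsp 6 s e []
        paths.foldl (fun ns path => sequences.foldl (fun ns2 sq => ns2 ++ [sq ++ path]) ns) [])
        [[]] (PySem.List.pyRange 0 (seq.length : Int) 1)
      = List.foldl (fun (sequences : List (List String)) (i : Int) =>
        let s := if i = 0 then "A" else PySem.List.pyGetD seq (i - 1) ""
        let e := PySem.List.pyGetD seq i ""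
        let paths := pvFsp 6 s e []
        paths.foldl (fun ns path => sequences.foldl (fun ns2 sq => ns2 ++ [sq ++ path]) ns) [])
        [[]] (PySem.List.pyRange 0 (seq.length : Int) 1) := by
    apply PySem.List.foldl_congr_mem
    intro acc i hi
    rw [PySem.List.mem_pyRange_one] at hi
    have h1 : PySem.List.pyGetD (seq ++ [x]) i "" = PySem.List.pyGetD seq i "" := by
      rw [PySem.List.pyGetD_eq_getElem _ _ (by omega) (by simp; omega),
          PySem.List.pyGetD_eq_getElem _ _ (by omega) (by omega)]
      rw [List.getElem_append_left (by omega)]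
    by_cases h0 : i = 0
    · subst h0; simp [h1]
    · have h2 : PySem.List.pyGetD (seq ++ [x]) (i - 1) "" = PySem.List.pyGetD seq (i - 1) "" := by
        rw [PySem.List.pyGetD_eq_getElem _ _ (by omega) (by simp; omega),
            PySem.List.pyGetD_eq_getElem _ _ (by omega) (by omega)]
        rw [List.getElem_append_left (by omega)]
      simp only [h1, h2, if_neg h0]
  rw [hinner]
  simp only [List.foldl_cons, List.foldl_nil]
  have hs : (if (seq.length : Int) = 0 then "A"
      else PySem.List.pyGetD (seq ++ [x]) ((seq.length : Int) - 1) "") = seq.getLastD "A" := by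
    cases seq with
    | nil => simp
    | cons a t =>
      rw [if_neg (by simp only [List.length_cons]; push_cast; omega)]
      rw [PySem.List.pyGetD_eq_getElem _ _ (by simp) (by simp)]
      have hidx : (((a :: t).length : Int) - 1).toNat = t.length := by simp
      simp only [hidx]
      simp [List.getLastD_eq_getLast?, List.getLast?_eq_getElem?]
      exact List.getElem_append_left (as := a :: t) (bs := [x]) (by simp)
  have he : PySem.List.pyGetD (seq ++ [x]) (seq.length : Int) "" = x := by
    rw [PySem.List.pyGetD_eq_getElem _ _ (by positivity) (by simp)]
    have : ((seq.length : Int)).toNat = seq.length := by omega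
    simp only [this]
    simp
  simp only [hs, he]

-- ===== VERDICT (by name: the statement is the Claim_ definition above) =====
theorem directional_to_directional_spec : Claim_equal_directional_to_directional := by
  intro seq hdom hpre
  unfold Spec_directional_to_directional
  unfold Pre_directional_to_directional at hpre
  induction seq using List.reverseRecOn with
  | nil => rfl
  | append_singleton seq x ih =>
    have hdomseq : Dom_directional_to_directional seq := by
      unfold Dom_directional_to_directional at hdom ⊢
      simp only [List.all_append, Bool.and_eq_true] at hdom
      exact hdom.1
    rw [List.isChain_append] at hpre
    obtain ⟨hc, -, hlast⟩ := hpre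
    have hcond : ((seq.getLastD "A") = "A" ∨ (seq.getLastD "A") = "^" ∨ (seq.getLastD "A") = "<"
        ∨ (seq.getLastD "A") = ">" ∨ (seq.getLastD "A") = "v") ∨ (seq.getLastD "A") = x := by
      cases hs : seq.getLast? with
      | none => left; left; simp [List.getLastD_eq_getLast?, hs]
      | some a =>
        have := hlast a (by rw [hs]; rfl) x (by rfl)
        rw [List.getLastD_eq_getLast?, hs]
        tauto
    rw [pvA_append, pvAlt_append, ih hdomseq hc, pvCombine_eq, pvStep_eq _ _ hcond]
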